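-- pv_equiv track=rewrite | github.com/AdamZhouSE/pythonHomework | Code/CodeRecords/2658/60777/265956.py | orop
-- ===== SOURCE A (Python) =====
-- def orop(al,li,dem):
--     if(al%dem==0 and al!=0 and len(li)==0):
--         return True,al
--     if(len(li)==0):
--         return False,0
--     temp=li.copy()
--     hold=temp[0]
--     temp.remove(hold)
--     if(orop(al|hold,temp,dem)[0]):
--         return True,orop(al|hold,temp,dem)[1]
--     if(orop(al,temp,dem)[0]):
--         return True,orop(al,temp,dem)[1]
--     return False,0
-- ===== SOURCE B (Python) =====
-- def orop(al, li, dem):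
--     n = len(li)
--     memo = {}
--
--     def go(acc, i):
--         key = (acc, i)
--         if key in memo:
--             return memo[key]
--         if i == n:
--             res = (True, acc) if acc % dem == 0 and acc != 0 else (False, 0)
--         else:
--             res = go(acc | li[i], i + 1)
--             if not res[0]:
--                 res = go(acc, i + 1)
--         memo[key] = res
--         return res
--
--     return go(al, 0)
-- ===== Notes on version B (the rewrite author's own statement) =====
-- stated objective: faster
-- what changed: B replaces A's list-copying recursion that re-invokes each successful recursive call twice with an index-based DFS memoized on (accumulated OR, index), so each state is computed once.
import Mathlib
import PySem

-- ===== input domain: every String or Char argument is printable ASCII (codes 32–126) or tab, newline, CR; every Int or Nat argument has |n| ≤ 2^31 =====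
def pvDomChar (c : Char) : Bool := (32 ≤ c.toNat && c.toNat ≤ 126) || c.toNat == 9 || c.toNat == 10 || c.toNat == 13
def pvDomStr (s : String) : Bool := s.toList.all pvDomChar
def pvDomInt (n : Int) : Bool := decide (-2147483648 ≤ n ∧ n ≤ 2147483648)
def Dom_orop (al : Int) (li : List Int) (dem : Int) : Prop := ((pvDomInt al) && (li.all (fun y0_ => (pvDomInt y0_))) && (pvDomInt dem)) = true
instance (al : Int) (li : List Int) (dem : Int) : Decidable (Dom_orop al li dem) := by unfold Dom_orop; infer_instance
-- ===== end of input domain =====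

-- B memoizes the DFS on (accumulated OR, index) so every state is computed once,
-- instead of A's list-copying recursion that re-runs each successful recursive call twice (objective: faster).

-- ===== PORT A =====
-- A's `temp=li.copy(); hold=temp[0]; temp.remove(hold)` removes the FIRST occurrence of
-- the head value, i.e. exactly the head: temp becomes the tail of li.
-- A's first two `if`s test `len(li)==0`, so matching on li keeps the branch order.
def orop (al : Int) (li : List Int) (dem : Int) : Bool × Int :=
  match li with
  | [] =>
    if PySem.Int.mod al dem == 0 && al != 0 then (true, al) else (false, 0)
  | hold :: temp =>
    if (orop (PySem.Int.bor al hold) temp dem).1 then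
      (true, (orop (PySem.Int.bor al hold) temp dem).2)
    else if (orop al temp dem).1 then
      (true, (orop al temp dem).2)
    else (false, 0)

-- ===== PORT B =====
-- go from Source B: memo threaded through; Source B tests `i == n`, and go is only ever called
-- with i ≤ n, so the totality guard `i < li.length` (else-branch = base case) coincides
-- with it on every reachable call.
def oropGo (li : List Int) (dem : Int) (acc : Int) (i : Nat)
    (memo : PySem.Dict (Int × Int) (Bool × Int)) :
    (Bool × Int) × PySem.Dict (Int × Int) (Bool × Int) :=
  match memo.get? (acc, (i : Int)) with
  | some v => (v, memo)
  | none =>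
    if h : i < li.length then
      let r1 := oropGo li dem (PySem.Int.bor acc li[i]) (i + 1) memo
      if r1.1.1 then
        (r1.1, r1.2.insert (acc, (i : Int)) r1.1)
      else
        let r2 := oropGo li dem acc (i + 1) r1.2
        (r2.1, r2.2.insert (acc, (i : Int)) r2.1)
    else
      let res := if PySem.Int.mod acc dem == 0 && acc != 0 then (true, acc) else ((false : Bool), (0 : Int))
      (res, memo.insert (acc, (i : Int)) res)
termination_by li.length - i
decreasing_by all_goals omega

def orop_alt (al : Int) (li : List Int) (dem : Int) : Bool × Int :=
  (oropGo li dem al 0 PySem.Dict.empty).1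

-- ===== PRECONDITION & SPEC =====
-- Pre_ excludes dem = 0, on which Python's `al % dem` raises ZeroDivisionError.
def Pre_orop (al : Int) (li : List Int) (dem : Int) : Prop := dem ≠ 0
instance (al : Int) (li : List Int) (dem : Int) : Decidable (Pre_orop al li dem) := by unfold Pre_orop; infer_instance
def pvWitness_orop : Int × List Int × Int := (0, [1, 2], 2)

def Spec_orop (al : Int) (li : List Int) (dem : Int) (out : Bool × Int) : Prop := out = orop_alt al li dem
instance (al : Int) (li : List Int) (dem : Int) (out : Bool × Int) : Decidable (Spec_orop al li dem out) := by unfold Spec_orop; infer_instance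

-- ===== CLAIM (what is proved, stated in full; the proofs are below) =====
def Claim_equal_orop : Prop := ∀ (al : Int) (li : List Int) (dem : Int), Dom_orop al li dem → Pre_orop al li dem → Spec_orop al li dem (orop al li dem)

-- ===== LEMMAS AND PROOFS =====

-- every (false, _) result of A's port is literally (false, 0)
theorem orop_false_eq (al : Int) (li : List Int) (dem : Int)
    (h : (orop al li dem).1 = false) : orop al li dem = (false, 0) := by
  cases li with
  | nil => rw [orop] at h ⊢; split_ifs at h ⊢ <;> simp_all
  | cons hold temp => rw [orop] at h ⊢; split_ifs at h ⊢ <;> simp_all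

-- memo invariant: every stored value is A's answer for its (accumulator, index) state
def MemoInv (li : List Int) (dem : Int) (memo : PySem.Dict (Int × Int) (Bool × Int)) : Prop :=
  ∀ (a : Int) (j : Nat) (v : Bool × Int),
    memo.get? (a, (j : Int)) = some v → v = orop a (li.drop j) dem

theorem memoInv_insert (li : List Int) (dem : Int)
    (memo : PySem.Dict (Int × Int) (Bool × Int)) (hinv : MemoInv li dem memo)
    (acc : Int) (i : Nat) (res : Bool × Int) (hres : res = orop acc (li.drop i) dem) :
    MemoInv li dem (memo.insert (acc, (i : Int)) res) := by
  intro a j v hv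
  rw [PySem.Dict.get?_insert] at hv
  split_ifs at hv with hk
  · obtain ⟨ha, hj⟩ := Prod.mk.injEq .. ▸ hk
    cases hv
    have : j = i := by exact_mod_cast hj
    subst this; subst ha; exact hres
  · exact hinv a j v hv

theorem oropGo_correct (li : List Int) (dem : Int) :
    ∀ (fuel i : Nat) (acc : Int) (memo : PySem.Dict (Int × Int) (Bool × Int)),
      li.length - i ≤ fuel → MemoInv li dem memo →
      (oropGo li dem acc i memo).1 = orop acc (li.drop i) dem ∧
      MemoInv li dem (oropGo li dem acc i memo).2 := by
  intro fuel
  induction fuel with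
  | zero =>
    intro i acc memo hfuel hinv
    have hi : li.length ≤ i := by omega
    rw [oropGo]
    cases hget : memo.get? (acc, (i : Int)) with
    | some v => simpa using ⟨hinv acc i v hget, hinv⟩
    | none =>
      have hlt : ¬ i < li.length := by omega
      simp only [dif_neg hlt, List.drop_eq_nil_of_le hi]
      refine ⟨by simp [orop], memoInv_insert li dem memo hinv acc i _ ?_⟩
      simp [orop, List.drop_eq_nil_of_le hi]
  | succ fuel ih =>
    intro i acc memo hfuel hinv
    rw [oropGo]
    cases hget : memo.get? (acc, (i : Int)) with
    | some v => simpa using ⟨hinv acc i v hget, hinv⟩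
    | none =>
      by_cases hlt : i < li.length
      · simp only [dif_pos hlt]
        have hdrop : li.drop i = li[i] :: li.drop (i + 1) :=
          List.drop_eq_getElem_cons hlt
        have hfuel' : li.length - (i + 1) ≤ fuel := by omega
        obtain ⟨h1v, h1inv⟩ := ih (i + 1) (PySem.Int.bor acc li[i]) memo hfuel' hinv
        set r1 := oropGo li dem (PySem.Int.bor acc li[i]) (i + 1) memo with hr1
        by_cases hb : r1.1.1
        · -- include-branch succeeded
          have hres : r1.1 = orop acc (li.drop i) dem := by
            rw [hdrop]; simp only [orop]
            rw [← h1v, if_pos hb, ← hb]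
          simp only [if_pos hb]
          exact ⟨hres, memoInv_insert li dem r1.2 h1inv acc i _ hres⟩
        · -- include-branch failed: recurse on the exclude-branch
          obtain ⟨h2v, h2inv⟩ := ih (i + 1) acc r1.2 hfuel' h1inv
          set r2 := oropGo li dem acc (i + 1) r1.2 with hr2
          have hres : r2.1 = orop acc (li.drop i) dem := by
            rw [hdrop]; simp only [orop]
            rw [← h1v, if_neg hb, ← h2v]
            by_cases hb2 : r2.1.1
            · rw [if_pos hb2, ← hb2]
            · rw [if_neg hb2, h2v]
              exact orop_false_eq _ _ _ (by rw [← h2v]; simpa using hb2)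
          simp only [if_neg hb]
          exact ⟨hres, memoInv_insert li dem r2.2 h2inv acc i _ hres⟩
      · have hi : li.length ≤ i := by omega
        simp only [dif_neg hlt, List.drop_eq_nil_of_le hi]
        refine ⟨by simp [orop], memoInv_insert li dem memo hinv acc i _ ?_⟩
        simp [orop, List.drop_eq_nil_of_le hi]

-- ===== VERDICT (by name: the statement is the Claim_ definition above) =====
theorem orop_spec : Claim_equal_orop := by
  intro al li dem _ _
  unfold Spec_orop orop_alt
  have hempty : MemoInv li dem PySem.Dict.empty := by
    intro a j v hv; simp [PySem.Dict.get?_empty] at hv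
  have := (oropGo_correct li dem li.length 0 al PySem.Dict.empty (by omega) hempty).1
  simpa using this.symm
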